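-- pv_equiv track=rewrite | github.com/vosslab/protein-image-grader | protein_image_grader/email_log.py | summarize_image
-- ===== SOURCE A (Python) =====
-- def _image_key(image_number: int) -> str:
-- 	# Zero-padded image_NN matches output-protein_image_NN.* convention.
-- 	return f"image_{image_number:02d}"
--
-- def get_status(data: dict, student_id: str, image_number: int):
-- 	"""
-- 	Return the stored status for (student_id, image_number), or None.
--
-- 	Returns None for unknown student IDs and for known students who have
-- 	no entry for this image yet.
-- 	"""
-- 	record = data.get(student_id)
-- 	if record is None:
-- 		return None
-- 	cell = record.get(_image_key(image_number))
-- 	if cell is None: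
-- 		return None
-- 	return cell.get("status")
--
-- def summarize_image(data: dict, image_number: int,
-- 		expected_student_ids) -> str:
-- 	"""
-- 	Compute the dashboard 'Emailed' status for one image.
--
-- 	Only `expected_student_ids` count; extra/old IDs in the log are
-- 	ignored. Returns:
-- 	  - "MISSING" when no expected student has any status for this image.
-- 	  - "OK" when every expected student has status exactly "sent".
-- 	  - "PARTIAL" otherwise. A single dry_run or failed cell among the
-- 	    expected IDs forces PARTIAL, so a dry-run pass cannot light OK.
-- 	"""
-- 	expected_ids = list(expected_student_ids)
-- 	if not expected_ids:
-- 		return "MISSING"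
-- 	statuses = []
-- 	for student_id in expected_ids:
-- 		statuses.append(get_status(data, student_id, image_number))
-- 	any_status = any(s is not None for s in statuses)
-- 	if not any_status:
-- 		return "MISSING"
-- 	all_sent = all(s == "sent" for s in statuses)
-- 	if all_sent:
-- 		return "OK"
-- 	return "PARTIAL"
-- ===== SOURCE B (Python) =====
-- def _image_key(image_number: int) -> str:
-- 	return f"image_{image_number:02d}"
--
-- def get_status(data: dict, student_id: str, image_number: int):
-- 	record = data.get(student_id)
-- 	if record is None:
-- 		return None
-- 	cell = record.get(_image_key(image_number))
-- 	if cell is None: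
-- 		return None
-- 	return cell.get("status")
--
-- def _classify(data: dict, student_id: str, image_number: int) -> str:
-- 	# Per-student verdict in the 3-element lattice {MISSING, OK, PARTIAL}.
-- 	s = get_status(data, student_id, image_number)
-- 	if s is None:
-- 		return "MISSING"
-- 	if s == "sent":
-- 		return "OK"
-- 	return "PARTIAL"
--
-- def summarize_image(data: dict, image_number: int,
-- 		expected_student_ids) -> str:
-- 	# Fold per-student verdicts with the lattice join: equal verdicts keep,
-- 	# mixed verdicts give PARTIAL, which is absorbing (early exit).
-- 	verdict = None
-- 	for student_id in expected_student_ids: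
-- 		cur = _classify(data, student_id, image_number)
-- 		verdict = cur if verdict is None else (verdict if verdict == cur else "PARTIAL")
-- 		if verdict == "PARTIAL":
-- 			return "PARTIAL"
-- 	return "MISSING" if verdict is None else verdict
-- ===== Notes on version B (the rewrite author's own statement) =====
-- stated objective: alternative
-- what changed: B drops A's collected status list and its two staged any/all scans: it maps each expected id to a 3-element verdict lattice {MISSING, OK, PARTIAL} and folds with the lattice join (equal keeps, mixed gives PARTIAL), short-circuiting as soon as the absorbing PARTIAL verdict is reached.
import Mathlib
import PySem

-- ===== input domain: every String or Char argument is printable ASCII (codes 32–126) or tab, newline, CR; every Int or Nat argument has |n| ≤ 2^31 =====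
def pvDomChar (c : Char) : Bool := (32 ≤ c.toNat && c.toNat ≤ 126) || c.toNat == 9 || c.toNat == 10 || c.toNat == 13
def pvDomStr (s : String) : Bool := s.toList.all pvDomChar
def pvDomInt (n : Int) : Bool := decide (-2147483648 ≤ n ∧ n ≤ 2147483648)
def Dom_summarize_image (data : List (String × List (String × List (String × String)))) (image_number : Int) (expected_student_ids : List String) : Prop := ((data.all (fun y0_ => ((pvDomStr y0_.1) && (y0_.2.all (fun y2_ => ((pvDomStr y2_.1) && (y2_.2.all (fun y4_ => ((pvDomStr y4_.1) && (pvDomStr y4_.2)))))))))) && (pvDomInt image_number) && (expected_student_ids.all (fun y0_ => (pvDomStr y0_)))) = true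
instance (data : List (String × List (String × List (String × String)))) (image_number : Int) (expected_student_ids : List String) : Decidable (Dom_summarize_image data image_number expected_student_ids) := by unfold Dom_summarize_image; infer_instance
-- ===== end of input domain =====

-- B replaces A's status list plus two any/all scans by a short-circuiting fold of per-id verdicts with a 3-element lattice join; same results.
-- ===== PORT A =====
def imageKey (n : Int) : String :=
  let s := PySem.Int.toStr n
  if s.toList.length < 2 then "image_0" ++ s else "image_" ++ s

def get_status (data : List (String × List (String × List (String × String)))) (student_id : String) (image_number : Int) : Option String :=
  match PySem.Dict.get? ⟨data⟩ student_id with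
  | none => none
  | some record =>
    match PySem.Dict.get? ⟨record⟩ (imageKey image_number) with
    | none => none
    | some cell => PySem.Dict.get? ⟨cell⟩ "status"

def summarize_image (data : List (String × List (String × List (String × String)))) (image_number : Int) (expected_student_ids : List String) : String :=
  if expected_student_ids = [] then "MISSING" else
  let statuses := expected_student_ids.foldl (fun acc sid => acc ++ [get_status data sid image_number]) []
  let any_status := statuses.any (fun s => !(s == none))
  if !any_status then "MISSING"
  else if statuses.all (fun s => s == some "sent") then "OK"
  else "PARTIAL"

-- ===== PORT B =====
def classifyStatus (data : List (String × List (String × List (String × String)))) (student_id : String) (image_number : Int) : String :=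
  match get_status data student_id image_number with
  | none => "MISSING"
  | some s => if s = "sent" then "OK" else "PARTIAL"

def altLoop (data : List (String × List (String × List (String × String)))) (image_number : Int) : List String → Option String → String
  | [], none => "MISSING"
  | [], some v => v
  | sid :: rest, acc =>
    let cur := classifyStatus data sid image_number
    let v := match acc with
      | none => cur
      | some r => if r = cur then r else "PARTIAL"
    if v = "PARTIAL" then "PARTIAL" else altLoop data image_number rest (some v)

def summarize_image_alt (data : List (String × List (String × List (String × String)))) (image_number : Int) (expected_student_ids : List String) : String :=
  altLoop data image_number expected_student_ids none

-- ===== PRECONDITION & SPEC =====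
def Spec_summarize_image (data : List (String × List (String × List (String × String)))) (image_number : Int) (expected_student_ids : List String) (out : String) : Prop := out = summarize_image_alt data image_number expected_student_ids
instance (data : List (String × List (String × List (String × String)))) (image_number : Int) (expected_student_ids : List String) (out : String) : Decidable (Spec_summarize_image data image_number expected_student_ids out) := by unfold Spec_summarize_image; infer_instance

-- ===== CLAIM (what is proved, stated in full; the proofs are below) =====
def Claim_equal_summarize_image : Prop := ∀ (data : List (String × List (String × List (String × String)))) (image_number : Int) (expected_student_ids : List String), Dom_summarize_image data image_number expected_student_ids → Spec_summarize_image data image_number expected_student_ids (summarize_image data image_number expected_student_ids)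

-- ===== LEMMAS AND PROOFS =====

lemma altLoop_missing (data : List (String × List (String × List (String × String)))) (n : Int) (ids : List String) :
    altLoop data n ids (some "MISSING") =
      if ids.all (fun sid => get_status data sid n == none) then "MISSING" else "PARTIAL" := by
  induction ids with
  | nil => simp [altLoop]
  | cons sid rest ih =>
    cases h : get_status data sid n with
    | none => simp [altLoop, classifyStatus, h, ih]
    | some s =>
      by_cases hs : s = "sent" <;> simp [altLoop, classifyStatus, h, hs]

lemma altLoop_ok (data : List (String × List (String × List (String × String)))) (n : Int) (ids : List String) :
    altLoop data n ids (some "OK") =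
      if ids.all (fun sid => get_status data sid n == some "sent") then "OK" else "PARTIAL" := by
  induction ids with
  | nil => simp [altLoop]
  | cons sid rest ih =>
    cases h : get_status data sid n with
    | none => simp [altLoop, classifyStatus, h]
    | some s =>
      by_cases hs : s = "sent" <;> simp [altLoop, classifyStatus, h, hs, ih]

-- ===== VERDICT (by name: the statement is the Claim_ definition above) =====
theorem summarize_image_spec : Claim_equal_summarize_image := by
  intro data n ids _
  unfold Spec_summarize_image summarize_image summarize_image_alt
  cases ids with
  | nil => simp [altLoop]
  | cons sid rest =>
    simp only [if_neg (List.cons_ne_nil sid rest)]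
    rw [PySem.List.foldl_append_singleton_eq_map]
    cases h : get_status data sid n with
    | none =>
      simp only [altLoop, classifyStatus, h, List.map_cons, List.any_cons, List.nil_append,
        if_neg (by decide : ¬ ("MISSING" : String) = "PARTIAL")]
      rw [altLoop_missing]
      by_cases hall : rest.all (fun s => get_status data s n == none)
      · have h1 : (rest.map (fun s => get_status data s n)).any (fun s => !(s == none)) = false := by
          simp only [List.any_map, List.any_eq_false, Function.comp]
          intro x hx
          simpa using List.all_eq_true.1 hall x hx
        simp [h1, hall]
      · have h1 : (rest.map (fun s => get_status data s n)).any (fun s => !(s == none)) = true := by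
          simp only [List.all_eq_true] at hall
          push_neg at hall
          obtain ⟨x, hx, hxn⟩ := hall
          simp only [List.any_map, List.any_eq_true, Function.comp]
          exact ⟨x, hx, by simp [Option.isSome_iff_ne_none, hxn]⟩
        simp [h1]
    | some s =>
      by_cases hs : s = "sent"
      · subst hs
        simp only [altLoop, classifyStatus, h, List.map_cons, List.any_cons,
          List.all_cons, List.nil_append, reduceIte]
        rw [altLoop_ok]
        by_cases hall : rest.all (fun sid => get_status data sid n == some "sent")
        · have h1 : (rest.map (fun s => get_status data s n)).all (fun s => s == some "sent") = true := by
            simpa [List.all_map, Function.comp] using hall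
          simp [h1, hall]
        · have h1 : (rest.map (fun s => get_status data s n)).all (fun s => s == some "sent") = false := by
            rw [← Bool.not_eq_true]
            intro hc
            exact hall (by simpa [List.all_map, Function.comp] using hc)
          simp [h1, hall]
      · simp [altLoop, classifyStatus, h, hs]
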